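-- pv_equiv track=rewrite | github.com/s2097382/Testing | PracticeQuiz6.py | list_triples
-- ===== SOURCE A (Python) =====
-- def list_triples(amin,cmax):
--     my_list = []
--     for a in range(amin,cmax-1):
--         for b in range(a+1,cmax):
--             for c in range(b+1,cmax+1):
--                 if a**2 + 2*b**2 == c**2:
--                     my_list.append((a,b,c))
--     return my_list
-- ===== SOURCE B (Python) =====
-- def list_triples(amin, cmax):
--     # Any solution has 1 <= c <= cmax (c > b forces b <= -1 if c <= 0, and then
--     # c*c = a*a + 2*b*b > b*b would make c < b), hence a*a <= c*c <= cmax*cmax,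
--     # so a >= -cmax; and c >= b + 1 >= a + 2 >= amin + 2.  Index the possible
--     # squares once and skip the provably empty prefix of the a-loop.
--     root = {c * c: c for c in range(max(amin + 2, 1), cmax + 1)}
--     out = []
--     for a in range(max(amin, -cmax), cmax - 1):
--         for b in range(a + 1, cmax):
--             c = root.get(a * a + 2 * b * b)
--             if c is not None and c >= b + 1:
--                 out.append((a, b, c))
--     return out
-- ===== Notes on version B (the rewrite author's own statement) =====
-- stated objective: alternative
-- what changed: Replaces A's innermost brute-force scan over all candidate c with a dict mapping c*c -> c built once (any solution provably has max(amin+2,1) <= c <= cmax), so each (a,b) pair does one dict lookup plus a bound check, and starts the a-loop at max(amin, -cmax) since no solution has a < -cmax.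
import Mathlib
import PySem

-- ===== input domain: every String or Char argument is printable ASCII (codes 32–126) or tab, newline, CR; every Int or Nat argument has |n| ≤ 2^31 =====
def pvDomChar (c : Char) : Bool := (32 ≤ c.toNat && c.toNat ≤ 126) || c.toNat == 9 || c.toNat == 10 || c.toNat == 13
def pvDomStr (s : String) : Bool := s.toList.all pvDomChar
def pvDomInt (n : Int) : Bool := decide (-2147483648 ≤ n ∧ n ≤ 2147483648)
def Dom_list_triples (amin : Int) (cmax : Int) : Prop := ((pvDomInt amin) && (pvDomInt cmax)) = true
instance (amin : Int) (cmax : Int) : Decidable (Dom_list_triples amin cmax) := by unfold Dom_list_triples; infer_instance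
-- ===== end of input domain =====

-- B replaces A's innermost brute-force scan over c by a dict of squares built once,
-- and skips the provably solution-free prefix a < -cmax of the a-loop (objective: alternative).

-- ===== PORT A =====
def list_triples (amin : Int) (cmax : Int) : List (List Int) :=
  (PySem.List.pyRange amin (cmax - 1) 1).foldl (fun acc a =>
    (PySem.List.pyRange (a + 1) cmax 1).foldl (fun acc b =>
      (PySem.List.pyRange (b + 1) (cmax + 1) 1).foldl (fun acc c =>
        if a ^ 2 + 2 * b ^ 2 = c ^ 2 then acc ++ [[a, b, c]] else acc) acc) acc) []

-- ===== PORT B =====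
-- {c*c: c for c in range(max(amin+2, 1), cmax+1)}
def pvRoot (amin : Int) (cmax : Int) : PySem.Dict Int Int :=
  (PySem.List.pyRange (max (amin + 2) 1) (cmax + 1) 1).foldl (fun d c => d.insert (c * c) c) PySem.Dict.empty

def list_triples_alt (amin : Int) (cmax : Int) : List (List Int) :=
  let root := pvRoot amin cmax
  (PySem.List.pyRange (max amin (-cmax)) (cmax - 1) 1).foldl (fun out a =>
    (PySem.List.pyRange (a + 1) cmax 1).foldl (fun out b =>
      match root.get? (a * a + 2 * b * b) with
      | some c => if b + 1 ≤ c then out ++ [[a, b, c]] else out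
      | none => out) out) []

-- ===== PRECONDITION & SPEC =====
def Spec_list_triples (amin : Int) (cmax : Int) (out : List (List Int)) : Prop := out = list_triples_alt amin cmax
instance (amin : Int) (cmax : Int) (out : List (List Int)) : Decidable (Spec_list_triples amin cmax out) := by unfold Spec_list_triples; infer_instance

-- ===== CLAIM (what is proved, stated in full; the proofs are below) =====
def Claim_equal_list_triples : Prop := ∀ (amin : Int) (cmax : Int), Dom_list_triples amin cmax → Spec_list_triples amin cmax (list_triples amin cmax)

-- ===== LEMMAS AND PROOFS =====

-- any c with c ≥ b+1 and c² = a²+2b² is positive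
theorem pv_pos_root (a b x : Int) (hx : b + 1 ≤ x) (hs : a ^ 2 + 2 * b ^ 2 = x ^ 2) : 1 ≤ x := by
  by_contra h
  have h0 : x ≤ 0 := by omega
  nlinarith [sq_nonneg a, sq_nonneg b, sq_nonneg (x - b), sq_nonneg (x + b)]

theorem pvRoot_items (amin cmax : Int) :
    (pvRoot amin cmax).items
      = (PySem.List.pyRange (max (amin + 2) 1) (cmax + 1) 1).map (fun c => (c * c, c)) := by
  unfold pvRoot
  rw [PySem.Dict.items_foldl_insert_fresh]
  · rfl
  · intro a _; simp
  · apply List.Nodup.map_on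
    · intro x hx y hy hxy
      rw [PySem.List.mem_pyRange_one] at hx hy
      have hx1 : 1 ≤ x := le_trans (le_max_right _ _) hx.1
      have hy1 : 1 ≤ y := le_trans (le_max_right _ _) hy.1
      nlinarith
    · exact PySem.List.nodup_pyRange_one _ _

theorem pvRoot_keys_nodup (amin cmax : Int) : (pvRoot amin cmax).keys.Nodup := by
  have h : (pvRoot amin cmax).keys
      = ((PySem.List.pyRange (max (amin + 2) 1) (cmax + 1) 1).map (fun c => (c * c, c))).map (·.1) := by
    simp only [PySem.Dict.keys, pvRoot_items]
  rw [h, List.map_map]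
  apply List.Nodup.map_on
  · intro x hx y hy hxy
    rw [PySem.List.mem_pyRange_one] at hx hy
    simp only [Function.comp] at hxy
    have hx1 : 1 ≤ x := le_trans (le_max_right _ _) hx.1
    have hy1 : 1 ≤ y := le_trans (le_max_right _ _) hy.1
    nlinarith
  · exact PySem.List.nodup_pyRange_one _ _

theorem pvRoot_get (amin cmax s c : Int) :
    (pvRoot amin cmax).get? s = some c
      ↔ (max (amin + 2) 1 ≤ c ∧ c < cmax + 1 ∧ c * c = s) := by
  rw [PySem.Dict.get?_eq_some_iff_mem_items _ _ _ (pvRoot_keys_nodup amin cmax), pvRoot_items]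
  constructor
  · intro h
    rcases List.mem_map.mp h with ⟨x, hx, hex⟩
    rw [PySem.List.mem_pyRange_one] at hx
    obtain ⟨h1, h2⟩ := Prod.mk.injEq .. ▸ hex
    subst h2
    exact ⟨hx.1, hx.2, h1⟩
  · rintro ⟨h1, h2, h3⟩
    exact List.mem_map.mpr ⟨c, PySem.List.mem_pyRange_one.mpr ⟨h1, h2⟩, by rw [h3]⟩

-- filter of a Nodup list whose matches are exactly c
theorem pv_filter_singleton {l : List Int} {p : Int → Bool} {c : Int} (hnd : l.Nodup) (hc : c ∈ l)
    (h : ∀ x ∈ l, p x = true ↔ x = c) : l.filter p = [c] := by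
  induction l with
  | nil => cases hc
  | cons y t ih =>
    rcases List.mem_cons.mp hc with rfl | hct
    · have hy : p c = true := (h c (List.mem_cons_self ..)).mpr rfl
      rw [List.filter_cons_of_pos hy]
      have : t.filter p = [] := by
        apply List.filter_eq_nil_iff.mpr
        intro x hx hpx
        exact (List.nodup_cons.mp hnd).1 (((h x (List.mem_cons_of_mem _ hx)).mp hpx) ▸ hx)
      rw [this]
    · have hy : ¬ p y = true := by
        intro hpy
        exact (List.nodup_cons.mp hnd).1 ((h y (List.mem_cons_self ..)).mp hpy ▸ hct)
      rw [List.filter_cons_of_neg hy]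
      exact ih (List.nodup_cons.mp hnd).2 hct (fun x hx => h x (List.mem_cons_of_mem _ hx))

-- Prop-if append loop is a filter (Prop version of PySem.List.foldl_append_if)
theorem pv_foldl_app_ite {α β : Type} (l : List α) (P : α → Prop) [DecidablePred P] (f : α → β) (acc : List β) :
    l.foldl (fun acc x => if P x then acc ++ [f x] else acc) acc
      = acc ++ (l.filter (fun x => decide (P x))).map f := by
  induction l generalizing acc with
  | nil => simp
  | cons y t ih =>
    simp only [List.foldl_cons, List.filter_cons]
    by_cases h : P y <;> simp [h, ih, List.append_assoc]

-- A's result for one (a, b): the c's surviving the filter, in order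
def pvFA (cmax a b : Int) : List (List Int) :=
  ((PySem.List.pyRange (b + 1) (cmax + 1) 1).filter (fun c => decide (a ^ 2 + 2 * b ^ 2 = c ^ 2))).map
    (fun c => [a, b, c])

-- the inner c-scan of A equals B's dict lookup and bound check
theorem pv_inner (amin cmax a b : Int) (ha : amin ≤ a) (hab : a + 1 ≤ b) :
    pvFA cmax a b
      = (match (pvRoot amin cmax).get? (a * a + 2 * b * b) with
         | some c => if b + 1 ≤ c then [[a, b, c]] else []
         | none => ([] : List (List Int))) := by
  unfold pvFA
  rcases h : (pvRoot amin cmax).get? (a * a + 2 * b * b) with _ | c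
  · -- no root at all: filter is empty
    have : (PySem.List.pyRange (b + 1) (cmax + 1) 1).filter
        (fun c => decide (a ^ 2 + 2 * b ^ 2 = c ^ 2)) = [] := by
      apply List.filter_eq_nil_iff.mpr
      intro x hx hpx
      rw [PySem.List.mem_pyRange_one] at hx
      rw [decide_eq_true_eq] at hpx
      have h1 : 1 ≤ x := pv_pos_root a b x hx.1 hpx
      have h2 : max (amin + 2) 1 ≤ x := by omega
      have : (pvRoot amin cmax).get? (a * a + 2 * b * b) = some x :=
        (pvRoot_get amin cmax _ x).mpr ⟨h2, hx.2, by nlinarith⟩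
      rw [h] at this; cases this
    rw [this]; rfl
  · rcases (pvRoot_get amin cmax _ c).mp h with ⟨hc1, hc2, hc3⟩
    have hc0 : 1 ≤ c := le_trans (le_max_right _ _) hc1
    by_cases hbc : b + 1 ≤ c
    · have : (PySem.List.pyRange (b + 1) (cmax + 1) 1).filter
          (fun c => decide (a ^ 2 + 2 * b ^ 2 = c ^ 2)) = [c] := by
        apply pv_filter_singleton (PySem.List.nodup_pyRange_one _ _)
          (PySem.List.mem_pyRange_one.mpr ⟨hbc, hc2⟩)
        intro x hx
        rw [PySem.List.mem_pyRange_one] at hx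
        rw [decide_eq_true_eq]
        constructor
        · intro hpx
          have h1 : 1 ≤ x := pv_pos_root a b x hx.1 hpx
          nlinarith
        · rintro rfl; nlinarith
      rw [this]; simp [hbc]
    · have : (PySem.List.pyRange (b + 1) (cmax + 1) 1).filter
          (fun c => decide (a ^ 2 + 2 * b ^ 2 = c ^ 2)) = [] := by
        apply List.filter_eq_nil_iff.mpr
        intro x hx hpx
        rw [PySem.List.mem_pyRange_one] at hx
        rw [decide_eq_true_eq] at hpx
        have h1 : 1 ≤ x := pv_pos_root a b x hx.1 hpx
        have hxc : x = c := by nlinarith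
        exact hbc (hxc ▸ hx.1)
      rw [this]; simp [hbc]

theorem pv_pyRange_nil (lo hi : Int) (h : hi ≤ lo) : PySem.List.pyRange lo hi 1 = [] := by
  rw [PySem.List.pyRange_one]
  have : (hi - lo).toNat = 0 := by omega
  rw [this]; rfl

-- dropping a solution-free prefix of the a-range
theorem pv_clamp {X : Type} (F : Int → List X) (m hi : Int) (hF : ∀ a : Int, a < m → F a = []) :
    ∀ lo : Int, (PySem.List.pyRange lo hi 1).flatMap F
      = (PySem.List.pyRange (max lo m) hi 1).flatMap F := by
  suffices H : ∀ (n : Nat) (lo : Int), (m - lo).toNat = n →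
      (PySem.List.pyRange lo hi 1).flatMap F
        = (PySem.List.pyRange (max lo m) hi 1).flatMap F by
    intro lo; exact H _ lo rfl
  intro n
  induction n with
  | zero =>
    intro lo hn
    have : max lo m = lo := max_eq_left (by omega)
    rw [this]
  | succ n ih =>
    intro lo hn
    have hlo : lo < m := by omega
    rw [max_eq_right hlo.le]
    by_cases hh : lo < hi
    · rw [PySem.List.pyRange_one_cons hh]
      have step := ih (lo + 1) (by omega)
      rw [max_eq_right (by omega : lo + 1 ≤ m)] at step
      simp only [List.flatMap_cons, hF lo hlo, List.nil_append]
      exact step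
    · rw [pv_pyRange_nil lo hi (by omega), pv_pyRange_nil m hi (by omega)]

-- no solution has a < -cmax
theorem pv_prefix_empty (cmax a : Int) (ha : a < -cmax) (b : Int) :
    pvFA cmax a b = [] := by
  unfold pvFA
  have : (PySem.List.pyRange (b + 1) (cmax + 1) 1).filter
      (fun c => decide (a ^ 2 + 2 * b ^ 2 = c ^ 2)) = [] := by
    apply List.filter_eq_nil_iff.mpr
    intro x hx hpx
    rw [PySem.List.mem_pyRange_one] at hx
    rw [decide_eq_true_eq] at hpx
    have h1 : 1 ≤ x := pv_pos_root a b x hx.1 hpx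
    nlinarith [sq_nonneg b, hx.2, h1]
  rw [this]; rfl

theorem pv_main (amin cmax : Int) : list_triples amin cmax = list_triples_alt amin cmax := by
  unfold list_triples list_triples_alt
  -- normalize A to a flatMap of flatMaps of pvFA
  have hA : ∀ (acc : List (List Int)),
      (PySem.List.pyRange amin (cmax - 1) 1).foldl (fun acc a =>
        (PySem.List.pyRange (a + 1) cmax 1).foldl (fun acc b =>
          (PySem.List.pyRange (b + 1) (cmax + 1) 1).foldl (fun acc c =>
            if a ^ 2 + 2 * b ^ 2 = c ^ 2 then acc ++ [[a, b, c]] else acc) acc) acc) acc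
      = acc ++ (PySem.List.pyRange amin (cmax - 1) 1).flatMap (fun a =>
          (PySem.List.pyRange (a + 1) cmax 1).flatMap (fun b => pvFA cmax a b)) := by
    intro acc
    rw [show (fun (acc : List (List Int)) a =>
        (PySem.List.pyRange (a + 1) cmax 1).foldl (fun acc b =>
          (PySem.List.pyRange (b + 1) (cmax + 1) 1).foldl (fun acc c =>
            if a ^ 2 + 2 * b ^ 2 = c ^ 2 then acc ++ [[a, b, c]] else acc) acc) acc)
      = fun (acc : List (List Int)) a =>
          acc ++ (PySem.List.pyRange (a + 1) cmax 1).flatMap (fun b => pvFA cmax a b)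
      from funext fun acc => funext fun a => by
        rw [show (fun (acc : List (List Int)) b =>
            (PySem.List.pyRange (b + 1) (cmax + 1) 1).foldl (fun acc c =>
              if a ^ 2 + 2 * b ^ 2 = c ^ 2 then acc ++ [[a, b, c]] else acc) acc)
          = fun (acc : List (List Int)) b => acc ++ pvFA cmax a b
          from funext fun acc => funext fun b => pv_foldl_app_ite _ _ _ _]
        exact PySem.List.foldl_append_eq_flatMap _ _ _]
    exact PySem.List.foldl_append_eq_flatMap _ _ _
  -- normalize B likewise
  have hB : ∀ (acc : List (List Int)),
      (PySem.List.pyRange (max amin (-cmax)) (cmax - 1) 1).foldl (fun out a =>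
        (PySem.List.pyRange (a + 1) cmax 1).foldl (fun out b =>
          match (pvRoot amin cmax).get? (a * a + 2 * b * b) with
          | some c => if b + 1 ≤ c then out ++ [[a, b, c]] else out
          | none => out) out) acc
      = acc ++ (PySem.List.pyRange (max amin (-cmax)) (cmax - 1) 1).flatMap (fun a =>
          (PySem.List.pyRange (a + 1) cmax 1).flatMap (fun b =>
            match (pvRoot amin cmax).get? (a * a + 2 * b * b) with
            | some c => if b + 1 ≤ c then [[a, b, c]] else []
            | none => ([] : List (List Int)))) := by
    intro acc
    rw [show (fun (out : List (List Int)) a =>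
        (PySem.List.pyRange (a + 1) cmax 1).foldl (fun out b =>
          match (pvRoot amin cmax).get? (a * a + 2 * b * b) with
          | some c => if b + 1 ≤ c then out ++ [[a, b, c]] else out
          | none => out) out)
      = fun (out : List (List Int)) a =>
          out ++ (PySem.List.pyRange (a + 1) cmax 1).flatMap (fun b =>
            match (pvRoot amin cmax).get? (a * a + 2 * b * b) with
            | some c => if b + 1 ≤ c then [[a, b, c]] else []
            | none => ([] : List (List Int)))
      from funext fun out => funext fun a => by
        rw [show (fun (out : List (List Int)) b =>
            match (pvRoot amin cmax).get? (a * a + 2 * b * b) with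
            | some c => if b + 1 ≤ c then out ++ [[a, b, c]] else out
            | none => out)
          = fun (out : List (List Int)) b =>
              out ++ (match (pvRoot amin cmax).get? (a * a + 2 * b * b) with
              | some c => if b + 1 ≤ c then [[a, b, c]] else []
              | none => ([] : List (List Int)))
          from funext fun out => funext fun b => by
            rcases (pvRoot amin cmax).get? (a * a + 2 * b * b) with _ | c
            · simp
            · by_cases hbc : b + 1 ≤ c <;> simp [hbc]]
        exact PySem.List.foldl_append_eq_flatMap _ _ _]
    exact PySem.List.foldl_append_eq_flatMap _ _ _
  rw [hA, hB, List.nil_append, List.nil_append]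
  rw [pv_clamp _ (-cmax) (cmax - 1) (fun a ha => by
    have : (PySem.List.pyRange (a + 1) cmax 1).flatMap (fun b => pvFA cmax a b)
        = (PySem.List.pyRange (a + 1) cmax 1).flatMap (fun _ => ([] : List (List Int))) :=
      List.flatMap_congr (fun b _ => pv_prefix_empty cmax a ha b)
    simp [this]) amin]
  apply List.flatMap_congr
  intro a hamem
  rw [PySem.List.mem_pyRange_one] at hamem
  apply List.flatMap_congr
  intro b hbmem
  rw [PySem.List.mem_pyRange_one] at hbmem
  exact pv_inner amin cmax a b (le_trans (le_max_left _ _) hamem.1) hbmem.1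

-- ===== VERDICT (by name: the statement is the Claim_ definition above) =====
theorem list_triples_spec : Claim_equal_list_triples := by
  intro amin cmax _
  unfold Spec_list_triples
  exact pv_main amin cmax
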